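-- pv_equiv track=rewrite | github.com/Rafasmafa/sprintly_answers | custom_customs.py | count_answers_per_group
-- ===== SOURCE A (Python) =====
-- def count_answers_per_group(input_str: str) -> int:
--     """return the sum of counts to which any person answered yes to a question across groups"""
--     groups = input_str.split('\n\n')
--     count = 0
--     for index, g in enumerate(groups):
--         group_unique_answers = set()
--         for individual_answers in g.split('\n'):
--             group_unique_answers = group_unique_answers | set(individual_answers)
--         count += len(group_unique_answers)
--     return count
-- ===== SOURCE B (Python) =====
-- def count_answers_per_group(input_str: str) -> int:
--     """return the sum of counts to which any person answered yes to a question across groups"""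
--     # Single character-level pass: a blank line ("\n\n") closes the current group;
--     # `seen` collects the distinct yes-answers of the group being scanned.
--     total = 0
--     seen = set()
--     pending = False  # True iff the previous character was a '\n' not yet consumed as a separator
--     for c in input_str:
--         if c == '\n':
--             if pending:
--                 total += len(seen)
--                 seen = set()
--                 pending = False
--             else:
--                 pending = True
--         else:
--             seen.add(c)
--             pending = False
--     return total + len(seen)
-- ===== Notes on version B (the rewrite author's own statement) =====
-- stated objective: alternative
-- what changed: Replaces A's split-into-groups then inner loop over lines unioning per-line sets with a single character-level state-machine pass: a pending-newline flag detects blank-line group boundaries, one running set collects the current group's answers, and counts are flushed into the total at each boundary.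
import Mathlib
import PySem

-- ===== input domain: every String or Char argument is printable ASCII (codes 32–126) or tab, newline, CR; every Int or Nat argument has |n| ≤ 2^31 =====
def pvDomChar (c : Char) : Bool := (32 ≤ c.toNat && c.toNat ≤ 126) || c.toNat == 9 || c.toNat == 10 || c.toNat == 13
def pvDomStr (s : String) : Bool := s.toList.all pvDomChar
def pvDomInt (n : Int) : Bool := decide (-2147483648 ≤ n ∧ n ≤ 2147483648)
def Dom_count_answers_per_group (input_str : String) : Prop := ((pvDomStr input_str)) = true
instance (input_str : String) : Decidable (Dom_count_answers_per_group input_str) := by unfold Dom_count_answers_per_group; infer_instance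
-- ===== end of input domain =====

-- B replaces A's split-into-groups + inner per-line set-union loop with a single
-- character-level state-machine pass (pending-newline flag, one running set); objective: alternative.

-- ===== PORT A =====
def count_answers_per_group (input_str : String) : Int :=
  let groups := PySem.Chars.splitOn input_str.toList ['\n', '\n']
  (PySem.List.enumerate groups).foldl
    (fun count p =>
      let group_unique_answers :=
        (PySem.Chars.splitOn p.2 ['\n']).foldl
          (fun s individual_answers => PySem.Set.union s (PySem.Set.ofList individual_answers))
          PySem.Set.empty
      count + PySem.Set.len group_unique_answers)
    0

-- ===== PORT B =====
-- one step of B's state machine; state = (total, seen, pending)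
def pvStep (st : Int × PySem.Set Char × Bool) (c : Char) : Int × PySem.Set Char × Bool :=
  if c = '\n' then
    if st.2.2 then (st.1 + PySem.Set.len st.2.1, PySem.Set.empty, false)
    else (st.1, st.2.1, true)
  else (st.1, PySem.Set.add st.2.1 c, false)

def count_answers_per_group_alt (input_str : String) : Int :=
  let fin := input_str.toList.foldl pvStep (0, PySem.Set.empty, false)
  fin.1 + PySem.Set.len fin.2.1

-- ===== PRECONDITION & SPEC =====
def Spec_count_answers_per_group (input_str : String) (out : Int) : Prop := out = count_answers_per_group_alt input_str
instance (input_str : String) (out : Int) : Decidable (Spec_count_answers_per_group input_str out) := by unfold Spec_count_answers_per_group; infer_instance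

-- ===== CLAIM (what is proved, stated in full; the proofs are below) =====
def Claim_equal_count_answers_per_group : Prop := ∀ (input_str : String), Dom_count_answers_per_group input_str → Spec_count_answers_per_group input_str (count_answers_per_group input_str)

-- ===== LEMMAS AND PROOFS =====

-- count of a group's distinct non-newline characters: both sides reduce to this
def pvS (g : List Char) : Int := PySem.Set.len (PySem.Set.ofList (g.filter (· ≠ '\n')))

def pvSum (gs : List (List Char)) : Int := (gs.map pvS).sum

theorem pv_ofList_snoc {α : Type} [BEq α] (xs : List α) (c : α) :
    PySem.Set.ofList (xs ++ [c]) = PySem.Set.add (PySem.Set.ofList xs) c := by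
  simp [PySem.Set.ofList, List.foldl_append]

-- accumulator lemma for splitOn.go
theorem pv_go_acc (sep : List Char) (f : Nat) (l cur : List Char) (acc : List (List Char)) :
    PySem.Chars.splitOn.go sep f l cur acc
      = acc.reverse ++ PySem.Chars.splitOn.go sep f l cur [] := by
  induction f generalizing l cur acc with
  | zero => rw [PySem.Chars.splitOn.go, PySem.Chars.splitOn.go]; simp
  | succ f ih =>
    cases l with
    | nil =>
      rw [PySem.Chars.splitOn.go, PySem.Chars.splitOn.go]
      simp
      all_goals omega
    | cons c rest =>
      rw [PySem.Chars.splitOn.go]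
      conv_rhs => rw [PySem.Chars.splitOn.go]
      by_cases hp : sep.isPrefixOf (c :: rest) = true
      · rw [if_pos hp, if_pos hp, ih, ih _ _ [cur.reverse]]
        simp
      · rw [if_neg hp, if_neg hp, ih, ih _ (c :: cur) []]

-- ===== A-side lemmas (characterise A's per-group value) =====

theorem pv_go_flatten (fuel : Nat) (l cur : List Char) (acc : List (List Char))
    (h : l.length < fuel) :
    (PySem.Chars.splitOn.go ['\n'] fuel l cur acc).flatten
      = acc.reverse.flatten ++ cur.reverse ++ l.filter (· ≠ '\n') := by
  induction fuel generalizing l cur acc with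
  | zero => omega
  | succ f ih =>
    cases l with
    | nil =>
      rw [PySem.Chars.splitOn.go]
      simp
      omega
    | cons c rest =>
      rw [PySem.Chars.splitOn.go]
      by_cases hc : c = '\n'
      · subst hc
        have hrest : rest.length < f := by simp at h; omega
        simp only [List.isPrefixOf, BEq.rfl, Bool.true_and, if_true]
        rw [show List.drop (['\n'].length) ('\n' :: rest) = rest from rfl, ih _ _ _ hrest]
        simp
      · have hrest : rest.length < f := by simp at h; omega
        rw [if_neg (by simp [List.isPrefixOf]; exact fun hcc => (hc hcc.symm).elim)]
        rw [ih _ _ _ hrest]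
        simp [hc]

theorem pv_flatten_splitOn (g : List Char) :
    (PySem.Chars.splitOn g ['\n']).flatten = g.filter (· ≠ '\n') := by
  unfold PySem.Chars.splitOn
  rw [pv_go_flatten _ _ _ _ (Nat.lt_succ_self _)]
  simp

theorem pv_mem_fold_union (L : List (List Char)) (s : PySem.Set Char) (c : Char) :
    (c ∈ L.foldl (fun s line => PySem.Set.union s (PySem.Set.ofList line)) s)
      ↔ c ∈ s ∨ c ∈ L.flatten := by
  induction L generalizing s with
  | nil => simp
  | cons x xs ih =>
    simp only [List.foldl_cons, List.flatten_cons, ih, PySem.Set.mem_union,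
      PySem.Set.mem_ofList, List.mem_append]
    tauto

theorem pv_nodup_fold_union (L : List (List Char)) (s : PySem.Set Char) (h : s.Nodup) :
    (L.foldl (fun s line => PySem.Set.union s (PySem.Set.ofList line)) s).Nodup := by
  induction L generalizing s with
  | nil => exact h
  | cons x xs ih => exact ih _ (PySem.Set.nodup_union _ _ h)

theorem pv_group_len (g : List Char) :
    PySem.Set.len ((PySem.Chars.splitOn g ['\n']).foldl
        (fun s line => PySem.Set.union s (PySem.Set.ofList line)) PySem.Set.empty)
      = pvS g := by
  have hperm : ((PySem.Chars.splitOn g ['\n']).foldl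
        (fun s line => PySem.Set.union s (PySem.Set.ofList line)) PySem.Set.empty).Perm
      (PySem.Set.ofList (g.filter (· ≠ '\n'))) := by
    rw [List.perm_ext_iff_of_nodup
      (pv_nodup_fold_union _ _ (by simp [PySem.Set.empty]))
      (PySem.Set.nodup_ofList _)]
    intro c
    rw [pv_mem_fold_union, pv_flatten_splitOn]
    simp [PySem.Set.empty, PySem.Set.mem_ofList, List.mem_filter]
  simp only [pvS, PySem.Set.len]
  rw [hperm.length_eq]

theorem pv_fold_enum (L : List (List Char)) (f : List Char → Int) (a i : Int) :
    (PySem.List.enumerate L i).foldl (fun c p => c + f p.2) a = a + (L.map f).sum := by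
  induction L generalizing a i with
  | nil => simp [PySem.List.enumerate]
  | cons x xs ih => simp [PySem.List.enumerate, ih]; ring

-- ===== B-side lemma: the state machine computes the per-group sum over splitOn =====

theorem pv_machine (f : Nat) (l cur : List Char) (total : Int) (h : l.length < f) :
    (let fin := l.foldl pvStep (total, PySem.Set.ofList (cur.reverse.filter (· ≠ '\n')), false);
     fin.1 + PySem.Set.len fin.2.1)
      = total + pvSum (PySem.Chars.splitOn.go ['\n', '\n'] f l cur []) := by
  induction f generalizing l cur total with
  | zero => omega
  | succ f ih =>
    cases l with
    | nil =>
      rw [PySem.Chars.splitOn.go]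
      simp [pvSum, pvS]
      all_goals omega
    | cons c rest =>
      rw [PySem.Chars.splitOn.go]
      by_cases hc : c = '\n'
      · subst hc
        cases rest with
        | nil =>
          rw [if_neg (by simp [List.isPrefixOf])]
          -- go f [] ('\n'::cur) [] = [('\n'::cur).reverse] for any f
          have hgo : PySem.Chars.splitOn.go ['\n', '\n'] f [] ('\n' :: cur) []
              = [('\n' :: cur).reverse] := by
            cases f with
            | zero => rw [PySem.Chars.splitOn.go]; simp
            | succ f => rw [PySem.Chars.splitOn.go]; simp; omega
          rw [hgo]
          simp [pvStep, pvSum, pvS, List.filter_append]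
        | cons c2 rest2 =>
          by_cases hc2 : c2 = '\n'
          · subst hc2
            rw [if_pos (by simp [List.isPrefixOf])]
            rw [show List.drop (['\n', '\n'].length) ('\n' :: '\n' :: rest2) = rest2 from rfl]
            rw [pv_go_acc _ _ _ _ [cur.reverse]]
            have hlen : rest2.length < f := by simp at h; omega
            have hih := ih rest2 []
              (total + PySem.Set.len (PySem.Set.ofList (cur.reverse.filter (· ≠ '\n')))) hlen
            simp only [List.reverse_nil, List.filter_nil] at hih
            simp only [List.foldl_cons]
            rw [show pvStep (pvStep (total,
                PySem.Set.ofList (cur.reverse.filter (· ≠ '\n')), false) '\n') '\n'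
              = (total + PySem.Set.len (PySem.Set.ofList (cur.reverse.filter (· ≠ '\n'))),
                 PySem.Set.empty, false) from by simp [pvStep]]
            rw [show (PySem.Set.ofList ([] : List Char)) = (PySem.Set.empty : PySem.Set Char) from rfl] at hih
            rw [hih]
            simp [pvSum, pvS]
            ring
          · rw [if_neg (by simp [List.isPrefixOf]; exact fun hcc => hc2 hcc.symm)]
            have hlen : (c2 :: rest2).length < f := by simp at h ⊢; omega
            have hih := ih (c2 :: rest2) ('\n' :: cur) total hlen
            have hfilt : (('\n' :: cur).reverse.filter (· ≠ '\n'))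
                = cur.reverse.filter (· ≠ '\n') := by
              simp [List.filter_append]
            rw [hfilt] at hih
            -- both machines take the same first step on c2 (≠ '\n'): pending=true vs pending=false
            simp only [List.foldl_cons] at hih ⊢
            rw [show pvStep (pvStep (total,
                PySem.Set.ofList (cur.reverse.filter (· ≠ '\n')), false) '\n') c2
              = pvStep (total, PySem.Set.ofList (cur.reverse.filter (· ≠ '\n')), false) c2
              from by simp [pvStep, hc2]]
            exact hih
      · rw [if_neg (by simp [List.isPrefixOf]; exact fun hcc => absurd hcc.symm hc)]
        have hlen : rest.length < f := by simp at h; omega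
        have hih := ih rest (c :: cur) total hlen
        have hfilt : ((c :: cur).reverse.filter (· ≠ '\n'))
            = cur.reverse.filter (· ≠ '\n') ++ [c] := by
          simp [List.filter_append, hc]
        rw [hfilt, pv_ofList_snoc] at hih
        simp only [List.foldl_cons]
        rw [show pvStep (total, PySem.Set.ofList (cur.reverse.filter (· ≠ '\n')), false) c
          = (total, PySem.Set.add (PySem.Set.ofList (cur.reverse.filter (· ≠ '\n'))) c, false)
          from by simp [pvStep, hc]]
        exact hih

-- ===== VERDICT (by name: the statement is the Claim_ definition above) =====
theorem count_answers_per_group_spec : Claim_equal_count_answers_per_group := by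
  intro input_str _
  unfold Spec_count_answers_per_group count_answers_per_group count_answers_per_group_alt
  dsimp only
  refine Eq.trans (pv_fold_enum (PySem.Chars.splitOn input_str.toList ['\n', '\n'])
    (fun g => PySem.Set.len ((PySem.Chars.splitOn g ['\n']).foldl
      (fun s individual_answers => PySem.Set.union s (PySem.Set.ofList individual_answers))
      PySem.Set.empty)) 0 0) ?_
  rw [Int.zero_add]
  rw [show ((PySem.Chars.splitOn input_str.toList ['\n', '\n']).map
      (fun g => PySem.Set.len ((PySem.Chars.splitOn g ['\n']).foldl
        (fun s individual_answers => PySem.Set.union s (PySem.Set.ofList individual_answers))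
        PySem.Set.empty))).sum
      = pvSum (PySem.Chars.splitOn input_str.toList ['\n', '\n'])
    from congrArg _ (List.map_congr_left (fun g _ => pv_group_len g))]
  have hB := pv_machine (input_str.toList.length + 1) input_str.toList [] 0
    (Nat.lt_succ_self _)
  simp only [List.reverse_nil, List.filter_nil, Int.zero_add] at hB
  rw [show (PySem.Set.ofList ([] : List Char)) = (PySem.Set.empty : PySem.Set Char) from rfl] at hB
  exact hB.symm
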